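-- pv_equiv track=rewrite | github.com/CXY1369/Job-Autopilot | autojobagent/core/macro_tasks.py | _pick_boolean_option
-- ===== SOURCE A (Python) =====
-- def _norm(text: str | None) -> str:
--     return " ".join((text or "").split()).strip().lower()
--
-- def _contains_any(text: str, keywords: list[str]) -> bool:
--     return any(k in text for k in keywords)
--
-- def _match_option_text(options: list[str], wanted: str) -> str | None:
--     w = _norm(wanted)
--     if not w:
--         return None
--     exact = [opt for opt in options if _norm(opt) == w]
--     if exact:
--         return exact[0]
--     starts = [opt for opt in options if _norm(opt).startswith(w)]
--     if starts:
--         return starts[0]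
--     contains = [opt for opt in options if w in _norm(opt) or _norm(opt) in w]
--     if contains:
--         return contains[0]
--     return None
--
-- _POSITIVE_OPTION_CUES = [
--     "yes",
--     "authorized",
--     "eligible",
--     "require",
--     "will",
--     "have",
--     "agree",
--     "accept",
--     "true",
-- ]
--
-- _NEGATIVE_OPTION_CUES = [
--     "no",
--     "not",
--     "do not",
--     "don't",
--     "without",
--     "decline",
--     "never",
--     "false",
-- ]
--
-- _NEUTRAL_OPTION_CUES = [
--     "prefer not",
--     "rather not",
--     "decline to answer",
--     "not specified",
--     "n/a",
-- ]
--
-- def _option_polarity(option: str) -> str | None: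
--     n = _norm(option)
--     if not n:
--         return None
--     if n in ("yes", "y", "true"):
--         return "positive"
--     if n in ("no", "n", "false"):
--         return "negative"
--     if _contains_any(n, _NEUTRAL_OPTION_CUES):
--         return "neutral"
--     pos = sum(1 for k in _POSITIVE_OPTION_CUES if k in n)
--     neg = sum(1 for k in _NEGATIVE_OPTION_CUES if k in n)
--     if pos > neg and pos > 0:
--         return "positive"
--     if neg > pos and neg > 0:
--         return "negative"
--     return None
--
-- def _pick_boolean_option(options: list[str], desired: bool) -> str | None:
--     direct = _match_option_text(options, "yes" if desired else "no")
--     if direct: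
--         return direct
--     target = "positive" if desired else "negative"
--     for option in options:
--         if _option_polarity(option) == target:
--             return option
--     return None
-- ===== SOURCE B (Python) =====
-- def _norm(text):
--     return " ".join((text or "").split()).strip().lower()
--
-- def _contains_any(text, keywords):
--     return any(k in text for k in keywords)
--
-- def _match_option_text(options, wanted):
--     # single pass: tier 0 = exact, 1 = prefix, 2 = substring either way;
--     # keep the earliest option at the lowest tier seen so far
--     w = _norm(wanted)
--     if not w:
--         return None
--     best = None  # (tier, option)
--     for opt in options:
--         no = _norm(opt)
--         if no == w:
--             tier = 0
--         elif no.startswith(w):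
--             tier = 1
--         elif w in no or no in w:
--             tier = 2
--         else:
--             continue
--         if best is None or tier < best[0]:
--             best = (tier, opt)
--     return best[1] if best is not None else None
--
-- _POSITIVE_OPTION_CUES = [
--     "yes", "authorized", "eligible", "require", "will", "have", "agree", "accept", "true",
-- ]
--
-- _NEGATIVE_OPTION_CUES = [
--     "no", "not", "do not", "don't", "without", "decline", "never", "false",
-- ]
--
-- _NEUTRAL_OPTION_CUES = [
--     "prefer not", "rather not", "decline to answer", "not specified", "n/a",
-- ]
--
-- def _option_polarity(option):
--     n = _norm(option)
--     if not n:
--         return None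
--     if n in ("yes", "y", "true"):
--         return "positive"
--     if n in ("no", "n", "false"):
--         return "negative"
--     if _contains_any(n, _NEUTRAL_OPTION_CUES):
--         return "neutral"
--     pos = sum(1 for k in _POSITIVE_OPTION_CUES if k in n)
--     neg = sum(1 for k in _NEGATIVE_OPTION_CUES if k in n)
--     if pos > neg and pos > 0:
--         return "positive"
--     if neg > pos and neg > 0:
--         return "negative"
--     return None
--
-- def _pick_boolean_option(options, desired):
--     direct = _match_option_text(options, "yes" if desired else "no")
--     if direct:
--         return direct
--     target = "positive" if desired else "negative"
--     for option in options:
--         if _option_polarity(option) == target: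
--             return option
--     return None
-- ===== Notes on version B (the rewrite author's own statement) =====
-- stated objective: alternative
-- what changed: B's _match_option_text replaces A's three sequential filtered scans (exact, then prefix, then substring) by a single pass that normalizes each option once, assigns it a tier (0 exact / 1 prefix / 2 substring-either-way) and keeps the earliest option at the lowest tier seen, replacing the tracked best only on a strictly lower tier.
import Mathlib
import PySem

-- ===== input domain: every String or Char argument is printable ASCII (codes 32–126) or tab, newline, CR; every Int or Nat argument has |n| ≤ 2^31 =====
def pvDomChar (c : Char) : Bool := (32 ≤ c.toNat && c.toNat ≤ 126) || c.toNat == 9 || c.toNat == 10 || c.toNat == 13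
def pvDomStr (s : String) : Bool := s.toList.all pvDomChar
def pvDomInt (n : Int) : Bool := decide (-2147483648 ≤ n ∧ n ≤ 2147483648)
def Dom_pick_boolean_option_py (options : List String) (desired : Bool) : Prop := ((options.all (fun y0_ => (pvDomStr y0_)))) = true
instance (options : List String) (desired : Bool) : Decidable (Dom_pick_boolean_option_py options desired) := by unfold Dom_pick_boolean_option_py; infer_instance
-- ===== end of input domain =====

-- B replaces _match_option_text's three sequential filtered scans by ONE pass that
-- tracks the earliest option at the lowest match tier (0 exact / 1 prefix / 2 substring);
-- objective: alternative (single-scan decomposition of the same cost).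

-- ===== PORT A =====
-- shared module helpers (identical in Source A and Source B)

-- _norm(text) = " ".join(text.split()).strip().lower()
def pyNorm (s : String) : String :=
  PySem.Str.lower (PySem.Str.strip (PySem.Str.join " " (PySem.Str.split₀ s)))

-- _contains_any
def containsAny (text : String) (keywords : List String) : Bool :=
  keywords.any (fun k => PySem.Str.isIn k text)

def posCues : List String :=
  ["yes", "authorized", "eligible", "require", "will", "have", "agree", "accept", "true"]
def negCues : List String :=
  ["no", "not", "do not", "don't", "without", "decline", "never", "false"]
def neutralCues : List String :=
  ["prefer not", "rather not", "decline to answer", "not specified", "n/a"]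

-- _option_polarity
def optionPolarity (option : String) : Option String :=
  let n := pyNorm option
  if n == "" then none
  else if n == "yes" || n == "y" || n == "true" then some "positive"
  else if n == "no" || n == "n" || n == "false" then some "negative"
  else if containsAny n neutralCues then some "neutral"
  else
    let pos := posCues.countP (fun k => PySem.Str.isIn k n)
    let neg := negCues.countP (fun k => PySem.Str.isIn k n)
    if pos > neg && pos > 0 then some "positive"
    else if neg > pos && neg > 0 then some "negative"
    else none

-- the polarity fallback loop of _pick_boolean_option (identical in both sources)
def polarityLoop (options : List String) (target : String) : Option String :=
  options.find? (fun option => optionPolarity option == some target)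

-- A's _match_option_text: three sequential filters
def matchOptionText (options : List String) (wanted : String) : Option String :=
  let w := pyNorm wanted
  if w == "" then none
  else
    match options.filter (fun opt => pyNorm opt == w) with
    | e :: _ => some e
    | [] =>
      match options.filter (fun opt => PySem.Str.startswith (pyNorm opt) w) with
      | s :: _ => some s
      | [] =>
        match options.filter (fun opt =>
            PySem.Str.isIn w (pyNorm opt) || PySem.Str.isIn (pyNorm opt) w) with
        | c :: _ => some c
        | [] => none

def pick_boolean_option_py (options : List String) (desired : Bool) : Option String :=
  let direct := matchOptionText options (if desired then "yes" else "no")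
  let target := if desired then "positive" else "negative"
  match direct with
  | some s => if s == "" then polarityLoop options target else some s  -- `if direct:` truthiness
  | none => polarityLoop options target

-- ===== PORT B =====
-- tier of a normalized option against w (Source B's if/elif chain)
def tierOf (w no : String) : Option Nat :=
  if no == w then some 0
  else if PySem.Str.startswith no w then some 1
  else if PySem.Str.isIn w no || PySem.Str.isIn no w then some 2
  else none

-- Source B's loop body: replace best only on a strictly lower tier
def matchStep (w : String) (best : Option (Nat × String)) (opt : String) : Option (Nat × String) :=
  match tierOf w (pyNorm opt) with
  | none => best
  | some t =>
    match best with
    | none => some (t, opt)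
    | some (bt, bo) => if t < bt then some (t, opt) else some (bt, bo)

-- B's _match_option_text: one best-tier-tracking pass
def matchOptionTextAlt (options : List String) (wanted : String) : Option String :=
  let w := pyNorm wanted
  if w == "" then none
  else (options.foldl (matchStep w) none).map (·.2)

def pick_boolean_option_py_alt (options : List String) (desired : Bool) : Option String :=
  let direct := matchOptionTextAlt options (if desired then "yes" else "no")
  let target := if desired then "positive" else "negative"
  match direct with
  | some s => if s == "" then polarityLoop options target else some s  -- `if direct:` truthiness
  | none => polarityLoop options target

-- ===== PRECONDITION & SPEC =====
def Spec_pick_boolean_option_py (options : List String) (desired : Bool) (out : Option String) : Prop := out = pick_boolean_option_py_alt options desired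
instance (options : List String) (desired : Bool) (out : Option String) : Decidable (Spec_pick_boolean_option_py options desired out) := by unfold Spec_pick_boolean_option_py; infer_instance

-- ===== CLAIM (what is proved, stated in full; the proofs are below) =====
def Claim_equal_pick_boolean_option_py : Prop := ∀ (options : List String) (desired : Bool), Dom_pick_boolean_option_py options desired → Spec_pick_boolean_option_py options desired (pick_boolean_option_py options desired)

-- ===== LEMMAS AND PROOFS =====

-- min-by-tier merge, left argument (earlier options) winning ties
def mergeBest : Option (Nat × String) → Option (Nat × String) → Option (Nat × String)
  | none, r => r
  | some a, none => some a
  | some (bt, bo), some (t, o) => if t < bt then some (t, o) else some (bt, bo)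

lemma matchStep_eq_mergeBest (w : String) (best : Option (Nat × String)) (opt : String) :
    matchStep w best opt = mergeBest best ((tierOf w (pyNorm opt)).map (fun t => (t, opt))) := by
  unfold matchStep
  cases tierOf w (pyNorm opt) with
  | none => cases best <;> rfl
  | some t => cases best with
    | none => rfl
    | some b => cases b; rfl

lemma mergeBest_assoc (a b c : Option (Nat × String)) :
    mergeBest (mergeBest a b) c = mergeBest a (mergeBest b c) := by
  rcases a with _ | ⟨at_, ao⟩ <;> rcases b with _ | ⟨bt, bo⟩ <;> rcases c with _ | ⟨ct, co⟩ <;>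
    simp only [mergeBest] <;> (try split_ifs) <;> (try simp only [mergeBest]) <;> (try split_ifs) <;>
    first | rfl | (exfalso; omega)

lemma foldl_matchStep_acc (w : String) (opts : List String) (acc : Option (Nat × String)) :
    opts.foldl (matchStep w) acc = mergeBest acc (opts.foldl (matchStep w) none) := by
  induction opts generalizing acc with
  | nil => cases acc <;> rfl
  | cons o rest ih =>
    simp only [List.foldl_cons]
    rw [ih (matchStep w acc o), ih (matchStep w none o),
        matchStep_eq_mergeBest, matchStep_eq_mergeBest, mergeBest_assoc]
    rfl

-- tierOf takes only the values none, some 0, some 1, some 2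
lemma tierOf_cases (w no : String) :
    tierOf w no = none ∨ tierOf w no = some 0 ∨ tierOf w no = some 1 ∨ tierOf w no = some 2 := by
  unfold tierOf; split_ifs <;> simp

-- the fold's result, described by the three tier filters
lemma foldl_matchStep_char (w : String) (opts : List String) :
    opts.foldl (matchStep w) none =
      match opts.filter (fun o => tierOf w (pyNorm o) == some 0) with
      | e :: _ => some (0, e)
      | [] =>
        match opts.filter (fun o => tierOf w (pyNorm o) == some 1) with
        | s :: _ => some (1, s)
        | [] =>
          match opts.filter (fun o => tierOf w (pyNorm o) == some 2) with
          | c :: _ => some (2, c)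
          | [] => none := by
  induction opts with
  | nil => rfl
  | cons o rest ih =>
    simp only [List.foldl_cons]
    rw [foldl_matchStep_acc, matchStep_eq_mergeBest, ih]
    rcases tierOf_cases w (pyNorm o) with h | h | h | h <;>
      simp only [h, Option.map_some, Option.map_none, List.filter_cons] <;>
      simp only [beq_iff_eq, Option.some.injEq, reduceCtorEq, ite_false, ite_true,
        OfNat.ofNat_ne_zero, OfNat.ofNat_ne_one, Nat.succ_ne_self] <;>
      (cases hf0 : rest.filter (fun o => tierOf w (pyNorm o) == some 0) <;>
       cases hf1 : rest.filter (fun o => tierOf w (pyNorm o) == some 1) <;>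
       cases hf2 : rest.filter (fun o => tierOf w (pyNorm o) == some 2) <;>
       simp [mergeBest])

lemma startswith_self (s : String) : PySem.Str.startswith s s = true := by
  simp only [PySem.Str.startswith_eq]
  rw [PySem.Chars.startswith_iff]

-- tier 0 is exactly A's exact-match predicate
lemma tier0_iff (w n : String) : (tierOf w n == some 0) = (n == w) := by
  unfold tierOf; split_ifs <;> simp_all

-- on a non-exact option, tier 1 is exactly A's prefix predicate
lemma tier1_iff (w n : String) (h : ¬ (n == w) = true) :
    (tierOf w n == some 1) = PySem.Str.startswith n w := by
  unfold tierOf; split_ifs <;> simp_all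

-- on a non-prefix option, tier 2 is exactly A's substring predicate
lemma tier2_iff (w n : String) (h : ¬ PySem.Str.startswith n w = true) :
    (tierOf w n == some 2) = (PySem.Str.isIn w n || PySem.Str.isIn n w) := by
  have hne : ¬ (n == w) = true := by
    intro he
    exact h (by rw [beq_iff_eq] at he; rw [he]; exact startswith_self w)
  unfold tierOf; split_ifs <;> simp_all

lemma matchText_eq (opts : List String) (wanted : String) :
    matchOptionText opts wanted = matchOptionTextAlt opts wanted := by
  unfold matchOptionText matchOptionTextAlt
  by_cases hw : (pyNorm wanted == "") = true
  · simp [hw]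
  · simp only [hw, if_false, Bool.false_eq_true]
    rw [foldl_matchStep_char]
    have e0 : opts.filter (fun o => tierOf (pyNorm wanted) (pyNorm o) == some 0)
        = opts.filter (fun o => pyNorm o == pyNorm wanted) := by
      apply List.filter_congr; intro o _; exact tier0_iff _ _
    rw [e0]
    cases h0 : opts.filter (fun o => pyNorm o == pyNorm wanted) with
    | cons e _ => rfl
    | nil =>
      have hm0 : ∀ o ∈ opts, ¬ (pyNorm o == pyNorm wanted) = true := by
        intro o ho; exact (List.filter_eq_nil_iff.mp h0) o ho
      have e1 : opts.filter (fun o => tierOf (pyNorm wanted) (pyNorm o) == some 1)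
          = opts.filter (fun o => PySem.Str.startswith (pyNorm o) (pyNorm wanted)) := by
        apply List.filter_congr; intro o ho; exact tier1_iff _ _ (hm0 o ho)
      rw [e1]
      cases h1 : opts.filter (fun o => PySem.Str.startswith (pyNorm o) (pyNorm wanted)) with
      | cons s _ => rfl
      | nil =>
        have hm1 : ∀ o ∈ opts, ¬ (PySem.Str.startswith (pyNorm o) (pyNorm wanted)) = true := by
          intro o ho; exact (List.filter_eq_nil_iff.mp h1) o ho
        have e2 : opts.filter (fun o => tierOf (pyNorm wanted) (pyNorm o) == some 2)
            = opts.filter (fun o =>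
                PySem.Str.isIn (pyNorm wanted) (pyNorm o) || PySem.Str.isIn (pyNorm o) (pyNorm wanted)) := by
          apply List.filter_congr; intro o ho; exact tier2_iff _ _ (hm1 o ho)
        rw [e2]
        cases h2 : opts.filter (fun o =>
            PySem.Str.isIn (pyNorm wanted) (pyNorm o) || PySem.Str.isIn (pyNorm o) (pyNorm wanted)) with
        | cons c _ => rfl
        | nil => rfl

-- ===== VERDICT (by name: the statement is the Claim_ definition above) =====
theorem pick_boolean_option_py_spec : Claim_equal_pick_boolean_option_py := by
  intro options desired _
  unfold Spec_pick_boolean_option_py pick_boolean_option_py pick_boolean_option_py_alt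
  rw [matchText_eq]
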